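-- pv_equiv track=rewrite | github.com/hyunlord/extract_logic | scripts/extractors/gdscript_systems.py | _extract_file_doc_comment
-- ===== SOURCE A (Python) =====
-- def _extract_file_doc_comment(lines: list[str]) -> str:
--     doc_lines: list[str] = []
--     started = False
--     for line in lines:
--         stripped = line.strip()
--         if not stripped:
--             if started:
--                 continue
--             continue
--         if stripped.startswith("##"):
--             started = True
--             doc_lines.append(stripped[2:].strip())
--             continue
--         if stripped.startswith("extends") or stripped.startswith("class_name"):
--             if started:
--                 continue
--             continue
--         break
--     return " ".join(doc_lines).strip()
-- ===== SOURCE B (Python) =====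
-- def _extract_file_doc_comment(lines: list[str]) -> str:
--     def rec(i):
--         # returns the already-joined doc string for lines[i:], or None if no '##' line contributes
--         if i == len(lines):
--             return None
--         s = lines[i].strip()
--         if s.startswith("##"):
--             head = s[2:].strip()
--             rest = rec(i + 1)
--             return head if rest is None else head + " " + rest
--         if not s or s.startswith("extends") or s.startswith("class_name"):
--             return rec(i + 1)
--         return None
--     doc = rec(0)
--     return "" if doc is None else doc.strip()
-- ===== Notes on version B (the rewrite author's own statement) =====
-- stated objective: alternative
-- what changed: Replaces A's imperative accumulator loop (doc_lines list, dead 'started' flag, break/continue, final join) by a direct recursion over the lines that builds the already-joined doc string itself as an Optional[str], so no list is ever materialised and join disappears.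
import Mathlib
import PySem

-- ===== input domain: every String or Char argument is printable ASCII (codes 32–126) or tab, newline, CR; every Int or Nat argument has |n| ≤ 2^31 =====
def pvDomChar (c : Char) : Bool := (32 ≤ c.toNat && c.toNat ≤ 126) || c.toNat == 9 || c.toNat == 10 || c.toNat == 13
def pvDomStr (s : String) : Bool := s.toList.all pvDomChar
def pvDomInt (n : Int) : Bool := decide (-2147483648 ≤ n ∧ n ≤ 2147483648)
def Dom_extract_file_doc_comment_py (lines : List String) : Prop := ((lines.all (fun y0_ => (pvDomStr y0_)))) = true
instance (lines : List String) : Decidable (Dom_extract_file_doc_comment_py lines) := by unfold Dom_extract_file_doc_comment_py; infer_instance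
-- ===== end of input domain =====

-- B replaces A's accumulator loop (with its dead 'started' flag, list building and final join)
-- by a direct recursion over the lines that builds the joined doc string itself, Option-valued; same cost, alternative decomposition.


-- ===== PORT A =====
-- A's loop: accumulate doc_lines (the 'started' flag is kept, as in the source, though dead)
def pvGoA : List String → List String → Bool → List String
  | [], doc_lines, _ => doc_lines
  | line :: rest, doc_lines, started =>
    let stripped := PySem.Str.strip line
    if PySem.Str.len stripped == 0 then
      pvGoA rest doc_lines started
    else if PySem.Str.startswith stripped "##" then
      pvGoA rest (doc_lines ++ [PySem.Str.strip (PySem.Str.slice stripped (some 2) none)]) true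
    else if PySem.Str.startswith stripped "extends" || PySem.Str.startswith stripped "class_name" then
      pvGoA rest doc_lines started
    else doc_lines

def extract_file_doc_comment_py (lines : List String) : String :=
  PySem.Str.strip (PySem.Str.join " " (pvGoA lines [] false))

-- ===== PORT B =====
-- Source B's inner rec(i): the already-joined doc string for lines[i:], or none if no '##' line contributes.
-- Python's 'head + " " + rest' is string concatenation, ported exactly via String.ofList of the
-- concatenated character lists.
def pvRecB : List String → Option String
  | [] => none
  | line :: restLines =>
    let s := PySem.Str.strip line
    if PySem.Str.startswith s "##" then
      let head := PySem.Str.strip (PySem.Str.slice s (some 2) none)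
      match pvRecB restLines with
      | none => some head
      | some r => some (String.ofList (head.toList ++ " ".toList ++ r.toList))
    else if PySem.Str.len s == 0 || PySem.Str.startswith s "extends" ||
        PySem.Str.startswith s "class_name" then
      pvRecB restLines
    else none

def extract_file_doc_comment_py_alt (lines : List String) : String :=
  match pvRecB lines with
  | none => ""
  | some doc => PySem.Str.strip doc

-- ===== PRECONDITION & SPEC =====
def Spec_extract_file_doc_comment_py (lines : List String) (out : String) : Prop := out = extract_file_doc_comment_py_alt lines
instance (lines : List String) (out : String) : Decidable (Spec_extract_file_doc_comment_py lines out) := by unfold Spec_extract_file_doc_comment_py; infer_instance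

-- ===== CLAIM (what is proved, stated in full; the proofs are below) =====
def Claim_equal_extract_file_doc_comment_py : Prop := ∀ (lines : List String), Dom_extract_file_doc_comment_py lines → Spec_extract_file_doc_comment_py lines (extract_file_doc_comment_py lines)

-- ===== LEMMAS AND PROOFS =====

-- the list of doc parts, written as a direct recursion (proof-side bridge between A and B)
def pvParts : List String → List String
  | [] => []
  | line :: rest =>
    let s := PySem.Str.strip line
    if PySem.Str.startswith s "##" then
      PySem.Str.strip (PySem.Str.slice s (some 2) none) :: pvParts rest
    else if PySem.Str.len s == 0 || PySem.Str.startswith s "extends" ||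
        PySem.Str.startswith s "class_name" then
      pvParts rest
    else []

lemma pvGoA_eq_parts (lines : List String) :
    ∀ (acc : List String) (st : Bool), pvGoA lines acc st = acc ++ pvParts lines := by
  induction lines with
  | nil => intro acc st; simp [pvGoA, pvParts]
  | cons l rest ih =>
    intro acc st
    by_cases hE : PySem.Chars.strip l.toList = []
    · have hns : PySem.Chars.startswith ([] : List Char) ['#', '#'] = false := by decide
      simp [pvGoA, pvParts, hE, hns, ih]
    · by_cases h1 : PySem.Chars.startswith (PySem.Chars.strip l.toList) ['#', '#'] = true
      · simp [pvGoA, pvParts, hE, h1, ih]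
      · by_cases h2 : PySem.Chars.startswith (PySem.Chars.strip l.toList)
            ['e', 'x', 't', 'e', 'n', 'd', 's'] = true
        · simp [pvGoA, pvParts, hE, h1, h2, ih]
        · by_cases h3 : PySem.Chars.startswith (PySem.Chars.strip l.toList)
              ['c', 'l', 'a', 's', 's', '_', 'n', 'a', 'm', 'e'] = true
          · simp [pvGoA, pvParts, hE, h1, h2, h3, ih]
          · simp [pvGoA, pvParts, hE, h1, h2, h3]

-- B's recursion computes exactly the join of the parts (none iff no parts)
lemma pvRecB_eq_join (lines : List String) :
    pvRecB lines =
      if pvParts lines = [] then none else some (PySem.Str.join " " (pvParts lines)) := by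
  induction lines with
  | nil => simp [pvRecB, pvParts]
  | cons l rest ih =>
    by_cases h1 : PySem.Chars.startswith (PySem.Chars.strip l.toList) ['#', '#'] = true
    · rcases hp : pvParts rest with _ | ⟨p, ps⟩
      · simp [pvRecB, pvParts, h1, ih, hp, PySem.Str.join, PySem.Chars.join_singleton,
          PySem.Str.strip, PySem.Str.slice]
      · simp [pvRecB, pvParts, h1, ih, hp, PySem.Str.join, PySem.Chars.join_cons_cons,
          PySem.Str.strip, PySem.Str.slice]
    · by_cases h0 : PySem.Chars.strip l.toList = []
      · have hns : PySem.Chars.startswith ([] : List Char) ['#', '#'] = false := by decide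
        simp [pvRecB, pvParts, h0, hns, ih]
      · by_cases h2 : PySem.Chars.startswith (PySem.Chars.strip l.toList)
            ['e', 'x', 't', 'e', 'n', 'd', 's'] = true
        · simp [pvRecB, pvParts, h1, h2, ih]
        · by_cases h3 : PySem.Chars.startswith (PySem.Chars.strip l.toList)
              ['c', 'l', 'a', 's', 's', '_', 'n', 'a', 'm', 'e'] = true
          · simp [pvRecB, pvParts, h1, h2, h3, ih]
          · simp [pvRecB, pvParts, h0, h1, h2, h3]

-- ===== VERDICT (by name: the statement is the Claim_ definition above) =====
theorem extract_file_doc_comment_py_spec : Claim_equal_extract_file_doc_comment_py := by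
  intro lines _
  unfold Spec_extract_file_doc_comment_py extract_file_doc_comment_py extract_file_doc_comment_py_alt
  rw [pvGoA_eq_parts, pvRecB_eq_join]
  rcases hp : pvParts lines with _ | ⟨p, ps⟩
  · simp [PySem.Str.join, PySem.Chars.join_nil, PySem.Str.strip]
    decide
  · simp
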